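-- pv_equiv track=rewrite | github.com/UndiFineD/PyAgent | src/logic/agents/cognitive/core/MemoryConsolidatorCore.py | distill_buffer
-- ===== SOURCE A (Python) =====
-- from typing import List, Dict, Any, Optional
--
-- def distill_buffer(buffer: List[Dict[str, Any]]) -> List[str]:
--     """Groups interactions and generates summary strings (insights)."""
--     if not buffer:
--         return []
--
--     summary: Dict[str, List[str]] = {}
--     for entry in buffer:
--         agent = entry.get("agent", "Unknown")
--         if agent not in summary:
--             summary[agent] = []
--         summary[agent].append(entry.get("task", "Unknown Task"))
--
--     consolidated: List[str] = []
--     for agent, tasks in summary.items():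
--         # In a real scenario, this might involve LLM calls (via the Shell)
--         # but the logic of collation is here.
--         insight = f"{agent} completed {len(tasks)} tasks. Key focus: {tasks[-1]}."
--         consolidated.append(insight)
--
--     return consolidated
-- ===== SOURCE B (Python) =====
-- def distill_buffer(buffer):
--     """Groups interactions and generates summary strings (insights)."""
--     pairs = [(e.get("agent", "Unknown"), e.get("task", "Unknown Task")) for e in buffer]
--     agents = []
--     for a, _ in pairs:
--         if a not in agents:
--             agents.append(a)
--     result = []
--     for a in agents:
--         n = sum(1 for x, _ in pairs if x == a)
--         last = next(t for x, t in reversed(pairs) if x == a)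
--         result.append(f"{a} completed {n} tasks. Key focus: {last}.")
--     return result
-- ===== Notes on version B (the rewrite author's own statement) =====
-- stated objective: alternative
-- what changed: B drops the dict-of-task-lists entirely: it dedups the agent names in first-appearance order and then, per agent, brute-force rescans the pair list (counting matches forward, finding the last task by a reversed scan) instead of grouping into per-agent containers in one pass.
import Mathlib
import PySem

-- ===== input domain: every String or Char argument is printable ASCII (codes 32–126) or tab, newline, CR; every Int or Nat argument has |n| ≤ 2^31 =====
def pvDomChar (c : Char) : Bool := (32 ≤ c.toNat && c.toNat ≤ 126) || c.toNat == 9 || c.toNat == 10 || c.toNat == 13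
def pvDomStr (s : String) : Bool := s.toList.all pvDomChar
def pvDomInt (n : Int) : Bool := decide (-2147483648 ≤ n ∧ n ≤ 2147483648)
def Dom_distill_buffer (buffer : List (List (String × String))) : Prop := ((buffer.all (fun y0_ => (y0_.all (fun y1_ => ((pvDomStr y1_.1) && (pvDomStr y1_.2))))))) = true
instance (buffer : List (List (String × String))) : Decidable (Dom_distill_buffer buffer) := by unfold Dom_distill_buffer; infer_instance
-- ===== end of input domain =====

-- B drops the dict of per-agent task lists: it dedups agent names in first-appearance
-- order, then per agent rescans the pair list (count forward, last task by a reversed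
-- scan) — an alternative decomposition, not claimed faster.

-- entry.get(k, dflt) on an entry dict (association list, first match)
def pvEntryGet (e : List (String × String)) (k dflt : String) : String :=
  ((PySem.Dict.mk e).get? k).getD dflt

-- ===== PORT A =====
def distill_buffer (buffer : List (List (String × String))) : List String :=
  if buffer = [] then []
  else
    let summary : PySem.Dict String (List String) :=
      buffer.foldl (fun s entry =>
        let agent := pvEntryGet entry "agent" "Unknown"
        let s := if s.contains agent then s else s.insert agent []
        s.modify agent [] (fun ts => ts ++ [pvEntryGet entry "task" "Unknown Task"]))
        PySem.Dict.empty
    summary.items.foldl (fun acc p =>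
      acc ++ [p.1 ++ " completed " ++ PySem.Int.toStr (p.2.length : Int) ++
              " tasks. Key focus: " ++ (PySem.List.pyGet? p.2 (-1)).getD "" ++ "."]) []
      -- tasks[-1]: each stored list is nonempty, so pyGet? never returns none

-- ===== PORT B =====
def distill_buffer_alt (buffer : List (List (String × String))) : List String :=
  let pairs := buffer.map (fun e =>
    (pvEntryGet e "agent" "Unknown", pvEntryGet e "task" "Unknown Task"))
  let agents := pairs.foldl (fun acc p =>
    if acc.contains p.1 then acc else acc ++ [p.1]) []
  agents.foldl (fun result a =>
    let n := (pairs.filter (fun p => p.1 == a)).length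
    let last := ((pairs.reverse.find? (fun p => p.1 == a)).map Prod.snd).getD ""
    result ++ [a ++ " completed " ++ PySem.Int.toStr (n : Int) ++
               " tasks. Key focus: " ++ last ++ "."]) []
    -- next(... reversed(pairs) ...): a never fails to occur in pairs, so find? is some

-- ===== PRECONDITION & SPEC =====
def Spec_distill_buffer (buffer : List (List (String × String))) (out : List String) : Prop := out = distill_buffer_alt buffer
instance (buffer : List (List (String × String))) (out : List String) : Decidable (Spec_distill_buffer buffer out) := by unfold Spec_distill_buffer; infer_instance

-- ===== CLAIM (what is proved, stated in full; the proofs are below) =====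
def Claim_equal_distill_buffer : Prop := ∀ (buffer : List (List (String × String))), Dom_distill_buffer buffer → Spec_distill_buffer buffer (distill_buffer buffer)

-- ===== LEMMAS AND PROOFS =====

-- the (agent, task) pair of an entry
def pvPair (e : List (String × String)) : String × String :=
  (pvEntryGet e "agent" "Unknown", pvEntryGet e "task" "Unknown Task")

-- A's loop body, as a named function (definitionally A's lambda)
def pvStepA (s : PySem.Dict String (List String)) (e : List (String × String)) :
    PySem.Dict String (List String) :=
  (if s.contains (pvPair e).1 then s else s.insert (pvPair e).1 []).modify
    (pvPair e).1 [] (fun ts => ts ++ [(pvPair e).2])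

theorem pvStepA_getD (d : PySem.Dict String (List String)) (a t c : String) :
    (((if d.contains a then d else d.insert a []).modify a []
        (fun ts => ts ++ [t]))).getD c []
      = d.getD c [] ++ (if a == c then [t] else []) := by
  by_cases hc : c = a
  · subst hc
    by_cases h : d.contains c = true
    · rw [if_pos h, PySem.Dict.getD_modify_self]; simp
    · rw [if_neg h, PySem.Dict.getD_modify_self, PySem.Dict.getD_insert_self,
        PySem.Dict.getD_of_not_contains d [] (Bool.eq_false_iff.mpr h)]
      simp
  · have h1 : ¬ (a == c) = true := by simpa using fun h => hc h.symm
    by_cases h : d.contains a = true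
    · rw [if_pos h, PySem.Dict.getD_modify_of_ne _ _ _ hc]
      simp [h1]
    · rw [if_neg h, PySem.Dict.getD_modify_of_ne _ _ _ hc,
        PySem.Dict.getD_insert_of_ne _ _ _ hc]
      simp [h1]

theorem pvStepA_keys (d : PySem.Dict String (List String)) (a t : String) :
    (((if d.contains a then d else d.insert a []).modify a []
        (fun ts => ts ++ [t]))).keys = PySem.Set.add d.keys a := by
  by_cases h : d.contains a = true
  · have hm : a ∈ d.keys := (PySem.Dict.contains_iff_mem_keys d a).mp h
    rw [if_pos h, PySem.Dict.keys_modify, PySem.Dict.keys_insert_of_contains _ _ h]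
    simp [PySem.Set.add, PySem.Set.contains, hm]
  · have h' : d.contains a = false := Bool.eq_false_iff.mpr h
    have hm : a ∉ d.keys := fun hmem =>
      h ((PySem.Dict.contains_iff_mem_keys d a).mpr hmem)
    rw [if_neg h, PySem.Dict.keys_modify,
      PySem.Dict.keys_insert_of_contains _ _ (PySem.Dict.contains_insert_self d a []),
      PySem.Dict.keys_insert_of_not_contains _ _ h']
    simp [PySem.Set.add, PySem.Set.contains, hm]

-- A's summary loop adds each entry's agent to the key set
theorem pvFoldl_keys :
    ∀ (l : List (List (String × String))) (d : PySem.Dict String (List String)),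
      (l.foldl pvStepA d).keys = PySem.Set.update d.keys (l.map (fun e => (pvPair e).1)) := by
  intro l
  induction l with
  | nil => intro d; simp [PySem.Set.update]
  | cons x l ih =>
    intro d
    show ((l.foldl pvStepA (pvStepA d x)).keys) = _
    rw [ih (pvStepA d x)]
    show PySem.Set.update (((if d.contains (pvPair x).1 then d else d.insert (pvPair x).1 []).modify
        (pvPair x).1 [] (fun ts => ts ++ [(pvPair x).2]))).keys _ = _
    rw [pvStepA_keys]
    rfl

theorem pvA_getD : ∀ (bs : List (List (String × String)))
    (d : PySem.Dict String (List String)) (k : String),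
    (bs.foldl pvStepA d).getD k []
      = d.getD k [] ++ ((bs.map pvPair).filter (fun p => p.1 == k)).map Prod.snd := by
  intro bs
  induction bs with
  | nil => intro d k; simp
  | cons e bs ih =>
    intro d k
    show ((bs.foldl pvStepA (pvStepA d e)).getD k []) = _
    rw [ih (pvStepA d e) k]
    show ((((if d.contains (pvPair e).1 then d else d.insert (pvPair e).1 []).modify
            (pvPair e).1 [] (fun ts => ts ++ [(pvPair e).2]))).getD k []) ++ _ = _
    rw [pvStepA_getD]
    by_cases h : (pvPair e).1 = k
    · simp [h, List.append_assoc]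
    · simp [h]

-- find? = head? of the filtered list
theorem pvFind?_eq_head?_filter {α : Type} (p : α → Bool) :
    ∀ (l : List α), l.find? p = (l.filter p).head? := by
  intro l
  induction l with
  | nil => rfl
  | cons x l ih =>
    cases h : p x with
    | true => rw [List.find?_cons_of_pos h, List.filter_cons_of_pos h]; rfl
    | false => rw [List.find?_cons_of_neg (by simp [h]), List.filter_cons_of_neg (by simp [h]), ih]

-- a reversed scan finds the LAST matching element
theorem pvFind?_reverse {α : Type} (p : α → Bool) (l : List α) :
    l.reverse.find? p = (l.filter p).getLast? := by
  rw [pvFind?_eq_head?_filter, List.filter_reverse, List.head?_reverse]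

-- ===== VERDICT (by name: the statement is the Claim_ definition above) =====
theorem distill_buffer_spec : Claim_equal_distill_buffer := by
  intro buffer _
  unfold Spec_distill_buffer
  by_cases hb : buffer = []
  · subst hb; rfl
  · have hkA : (buffer.foldl pvStepA PySem.Dict.empty).keys
        = PySem.Set.ofList ((buffer.map pvPair).map Prod.fst) := by
      rw [pvFoldl_keys, List.map_map]
      rfl
    have hndA := hkA ▸ PySem.Set.nodup_ofList ((buffer.map pvPair).map Prod.fst)
    -- A side
    show (if buffer = [] then [] else _) = _
    rw [if_neg hb]
    show ((buffer.foldl pvStepA PySem.Dict.empty).items.foldl _ []) = _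
    rw [PySem.List.foldl_append_singleton_eq_map, List.nil_append,
      PySem.Dict.items_eq_map_keys _ hndA ([] : List String), hkA]
    -- B side: the dedup loop is set(agents) in first-appearance order
    have hagents : ((buffer.map pvPair).foldl (fun acc p =>
          if acc.contains p.1 then acc else acc ++ [p.1]) [])
        = PySem.Set.ofList ((buffer.map pvPair).map Prod.fst) := by
      rw [show ((buffer.map pvPair).foldl (fun acc p =>
            if acc.contains p.1 then acc else acc ++ [p.1]) [])
          = (((buffer.map pvPair).map Prod.fst).foldl (fun acc a =>
            if acc.contains a then acc else acc ++ [a]) []) from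
        (List.foldl_map (f := Prod.fst)
          (g := fun (acc : List String) a => if acc.contains a then acc else acc ++ [a])
          (l := buffer.map pvPair) (init := [])).symm]
      rfl
    show _ = (((buffer.map pvPair).foldl (fun acc p =>
        if acc.contains p.1 then acc else acc ++ [p.1]) []).foldl _ [])
    rw [hagents, PySem.List.foldl_append_singleton_eq_map, List.nil_append,
      List.map_map]
    -- pointwise
    apply List.map_congr_left
    intro k _
    simp only [Function.comp_apply]
    rw [pvA_getD, pvFind?_reverse]
    simp only [PySem.Dict.getD_empty, List.nil_append, PySem.List.pyGet?_neg_one,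
      List.length_map]
    rw [← List.getLast?_map]
    rfl
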